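-- pv_equiv track=rewrite | github.com/pypi-data/pypi-mirror-404 | packages/xaeian/xaeian-0.1.0-py3-none-any.whl/xaeian/xstring.py | strip_comments
-- ===== SOURCE A (Python) =====
-- def strip_comments(string:str, line:str="//", block:tuple=("/*", "*/"), quotes:str='"') -> str:
--   """
--   Remove comments while preserving quoted strings.
--
--   Args:
--     string: Input source text.
--     line: Line comment marker (e.g., `"//"`, `"#"`). `None` to disable.
--     block: Block comment markers as `(open, close)` tuple. `None` to disable.
--     quotes: Quote character(s) protecting content.
--
--   Returns:
--     Text with comments removed.
--
--   Example:
--     >>> strip_comments('int x = 1; // comment\\nint y;')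
--     'int x = 1; \\nint y;'
--   """
--   result = []
--   i = 0
--   quote_char = None
--   while i < len(string):
--     ch = string[i]
--     if quote_char:
--       result.append(ch)
--       if ch == quote_char and i + 1 < len(string) and string[i + 1] == quote_char:
--         result.append(string[i + 1])
--         i += 2
--         continue
--       if ch == quote_char: quote_char = None
--       i += 1
--     else:
--       if ch in quotes:
--         quote_char = ch
--         result.append(ch)
--         i += 1
--       elif line and string[i:i + len(line)] == line:
--         while i < len(string) and string[i] != "\n": i += 1
--       elif block and string[i:i + len(block[0])] == block[0]:
--         i += len(block[0])
--         while i < len(string) and string[i:i + len(block[1])] != block[1]: i += 1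
--         i += len(block[1])
--       else:
--         result.append(ch)
--         i += 1
--   return "".join(result)
-- ===== SOURCE B (Python) =====
-- def _quoted(s, q):
--   """Consume a quoted body up to and including the closing quote (doubled quotes kept)."""
--   taken = []
--   while True:
--     j = s.find(q)
--     if j < 0:
--       return "".join(taken) + s, ""
--     if s[j + 1:j + 2] == q:
--       taken.append(s[:j + 2])
--       s = s[j + 2:]
--     else:
--       return "".join(taken) + s[:j + 1], s[j + 1:]
--
-- def strip_comments(string: str, line: str = "//", block: tuple = ("/*", "*/"), quotes: str = '"') -> str:
--   # chars at which something other than plain text can begin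
--   trig = set(quotes)
--   if line:
--     trig.add(line[0])
--   if block and block[0]:
--     trig.add(block[0][0])
--   parts = []
--   s = string
--   while s:
--     c = s[0]
--     if c in quotes:
--       span, s = _quoted(s[1:], c)
--       parts.append(c + span)
--     elif line and s.startswith(line):
--       nl = s.find("\n")
--       s = "" if nl < 0 else s[nl:]
--     elif block and s.startswith(block[0]):
--       rest = s[len(block[0]):]
--       end = rest.find(block[1])
--       s = "" if end < 0 else rest[end + len(block[1]):]
--     else:
--       j = 1
--       while j < len(s) and s[j] not in trig:
--         j += 1
--       parts.append(s[:j])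
--       s = s[j:]
--   return "".join(parts)
-- ===== Notes on version B (the rewrite author's own statement) =====
-- stated objective: alternative
-- what changed: Replaced A's char-by-char index automaton with a cross-iteration quote_char state by stateless suffix rewriting that jumps with substring search (str.find/startswith): a helper consumes a whole quoted span, comments are cut by one find, and plain runs are copied as slices.
import Mathlib
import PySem

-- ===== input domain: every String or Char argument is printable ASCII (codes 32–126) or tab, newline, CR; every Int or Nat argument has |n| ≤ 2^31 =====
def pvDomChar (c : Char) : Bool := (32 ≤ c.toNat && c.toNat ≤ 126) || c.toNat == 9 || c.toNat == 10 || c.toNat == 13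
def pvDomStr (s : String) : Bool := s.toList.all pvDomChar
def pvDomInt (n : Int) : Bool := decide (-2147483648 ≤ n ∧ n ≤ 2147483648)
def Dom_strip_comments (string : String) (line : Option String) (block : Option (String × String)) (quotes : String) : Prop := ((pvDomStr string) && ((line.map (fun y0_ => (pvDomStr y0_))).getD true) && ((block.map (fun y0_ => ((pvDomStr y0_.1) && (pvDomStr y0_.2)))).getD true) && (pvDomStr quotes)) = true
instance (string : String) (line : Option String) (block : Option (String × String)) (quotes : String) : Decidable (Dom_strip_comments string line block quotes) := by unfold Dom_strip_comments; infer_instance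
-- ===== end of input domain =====

-- B replaces A's char-by-char index automaton (mutable quote state) by stateless suffix
-- rewriting that jumps via substring search; the return values are proved equal below.

-- ===== PORT A =====
-- `line and string[i:i+len(line)] == line` / `block and ...`: empty line marker is falsy.
def pvLineHit (line : Option String) (l : List Char) : Bool :=
  match line with
  | some lm => (!(lm == "")) && lm.toList.isPrefixOf l
  | none => false

-- inner `while i < len(string) and string[i] != "\n": i += 1` (returns the remaining suffix)
def pvSkipLine : List Char → List Char
  | [] => []
  | c :: t => if c = '\n' then c :: t else pvSkipLine t

-- inner `while i < len(string) and string[i:i+len(block[1])] != block[1]: i += 1`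
def pvSkipBlock (close : List Char) : List Char → List Char
  | [] => []
  | c :: t => if close.isPrefixOf (c :: t) then c :: t else pvSkipBlock close t

-- A's `while i < len(string)` loop over the remaining suffix `string[i:]` and quote_char;
-- the `if h : _ then _ else []` guards only totalise the port: they fire exactly where
-- Python A loops forever (a line marker starting with '\n' triggers, or block = ("","")
-- triggers), so they never fire on an input where Python A returns.
def pvLoopA (line : Option String) (block : Option (String × String)) (quotes : String) :
    List Char → Option Char → List Char
  | [], _ => []
  | ch :: rest, some q =>
    if ch = q then
      match hr : rest with
      | c2 :: rest2 =>
        if c2 = q then ch :: c2 :: pvLoopA line block quotes rest2 (some q)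
        else ch :: pvLoopA line block quotes rest none
      | [] => ch :: pvLoopA line block quotes [] none
    else ch :: pvLoopA line block quotes rest (some q)
  | ch :: rest, none =>
    if quotes.toList.contains ch then ch :: pvLoopA line block quotes rest (some ch)
    else if pvLineHit line (ch :: rest) then
      let l' := pvSkipLine (ch :: rest)
      if h : l'.length < (ch :: rest).length then pvLoopA line block quotes l' none else []
    else
      match block with
      | some (o, cl) =>
        if o.toList.isPrefixOf (ch :: rest) then
          let l' := (pvSkipBlock cl.toList ((ch :: rest).drop o.toList.length)).drop cl.toList.length
          if h : l'.length < (ch :: rest).length then pvLoopA line block quotes l' none else []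
        else ch :: pvLoopA line block quotes rest none
      | none => ch :: pvLoopA line block quotes rest none
  termination_by l _ => l.length
  decreasing_by
    all_goals simp only [List.length_cons]
    all_goals first
      | assumption
      | omega
      | (subst hr; simp only [List.length_cons]; omega)

def strip_comments (string : String) (line : Option String) (block : Option (String × String)) (quotes : String) : String :=
  String.mk (pvLoopA line block quotes string.toList none)

-- ===== PORT B =====
-- B's `line and s.startswith(line)` test
def pvLineHitB (line : Option String) (l : List Char) : Bool :=
  match line with
  | some lm => (!(lm == "")) && lm.toList.isPrefixOf l
  | none => false

-- `rest.find(block[1])` (first index where the pattern is a prefix; `"".find` = 0)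
def pvFindSub (pat : List Char) : List Char → Option Nat
  | [] => if pat.isPrefixOf ([] : List Char) then some 0 else none
  | c :: t => if pat.isPrefixOf (c :: t) then some 0 else (pvFindSub pat t).map (· + 1)

-- `_quoted(s, q)`: consume up to and including the closing quote, keeping doubled quotes
def pvQuoted (q : Char) (s : List Char) : List Char × List Char :=
  match _hf : s.findIdx? (· = q) with
  | none => (s, [])
  | some j =>
    match h2 : s.drop (j + 1) with
    | c2 :: _ =>
      if c2 = q then
        let p := pvQuoted q (s.drop (j + 2))
        (s.take (j + 2) ++ p.1, p.2)
      else (s.take (j + 1), s.drop (j + 1))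
    | [] => (s.take (j + 1), s.drop (j + 1))
  termination_by s.length
  decreasing_by
    have := congrArg List.length h2
    simp [List.length_drop] at this ⊢
    omega

-- the `trig` set of first characters at which non-plain text can begin
def pvTrig (line : Option String) (block : Option (String × String)) (quotes : String) : List Char :=
  quotes.toList
    ++ (match line with
        | some lm => match lm.toList with | [] => [] | h :: _ => [h]
        | none => [])
    ++ (match block with
        | some (o, _) => match o.toList with | [] => [] | h :: _ => [h]
        | none => [])

-- `j = 1; while j < len(s) and s[j] not in trig: j += 1` — the plain run after s[0]
def pvRun (trig : List Char) : List Char → List Char × List Char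
  | [] => ([], [])
  | c :: t =>
    if trig.contains c then ([], c :: t)
    else
      let p := pvRun trig t
      (c :: p.1, p.2)

theorem pvQuoted_snd_le (q : Char) (s : List Char) : (pvQuoted q s).2.length ≤ s.length := by
  fun_induction pvQuoted q s with
  | case1 => simp
  | case2 s j hf c2 p h2 ih =>
    exact le_trans ih (by simp)
  | case3 s j hf c2 l2 h2 hc => simp [List.length_drop]
  | case4 s j hf h2 => simp [List.length_drop]

theorem pvRun_snd_le (trig : List Char) (t : List Char) : (pvRun trig t).2.length ≤ t.length := by
  induction t with
  | nil => simp [pvRun]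
  | cons c t ih =>
    rw [pvRun]
    split
    · simp
    · simpa using Nat.le_succ_of_le ih

-- B's `while s:` loop; guards as in port A: they fire exactly where Python B loops forever
def pvLoopB (line : Option String) (block : Option (String × String)) (quotes : String)
    (trig : List Char) : List Char → List Char
  | [] => []
  | c :: rest =>
    if quotes.toList.contains c then
      let p := pvQuoted c rest
      c :: (p.1 ++ pvLoopB line block quotes trig p.2)
    else if pvLineHitB line (c :: rest) then
      let s' := match (c :: rest).findIdx? (· = '\n') with
                | none => [] | some nl => (c :: rest).drop nl
      if h : s'.length < (c :: rest).length then pvLoopB line block quotes trig s' else []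
    else
      match block with
      | some (o, cl) =>
        if o.toList.isPrefixOf (c :: rest) then
          let r := (c :: rest).drop o.toList.length
          let s' := match pvFindSub cl.toList r with
                    | none => [] | some e => r.drop (e + cl.toList.length)
          if h : s'.length < (c :: rest).length then pvLoopB line block quotes trig s' else []
        else
          let p := pvRun trig rest
          (c :: p.1) ++ pvLoopB line block quotes trig p.2
      | none =>
        let p := pvRun trig rest
        (c :: p.1) ++ pvLoopB line block quotes trig p.2
  termination_by l => l.length
  decreasing_by
    all_goals simp only [List.length_cons]
    all_goals first
      | assumption
      | exact Nat.lt_succ_of_le (pvQuoted_snd_le _ _)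
      | exact Nat.lt_succ_of_le (pvRun_snd_le _ _)

def strip_comments_alt (string : String) (line : Option String) (block : Option (String × String)) (quotes : String) : String :=
  String.mk (pvLoopB line block quotes (pvTrig line block quotes) string.toList)

-- ===== PRECONDITION & SPEC =====
def Spec_strip_comments (string : String) (line : Option String) (block : Option (String × String)) (quotes : String) (out : String) : Prop := out = strip_comments_alt string line block quotes
instance (string : String) (line : Option String) (block : Option (String × String)) (quotes : String) (out : String) : Decidable (Spec_strip_comments string line block quotes out) := by unfold Spec_strip_comments; infer_instance

-- ===== CLAIM (what is proved, stated in full; the proofs are below) =====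
def Claim_equal_strip_comments : Prop := ∀ (string : String) (line : Option String) (block : Option (String × String)) (quotes : String), Dom_strip_comments string line block quotes → Spec_strip_comments string line block quotes (strip_comments string line block quotes)

-- ===== LEMMAS AND PROOFS =====

theorem pvLoopA_nil_none (line : Option String) (block : Option (String × String)) (quotes : String) :
    pvLoopA line block quotes [] none = [] := by
  simp [pvLoopA]

theorem pvLoopA_no_quote (line : Option String) (block : Option (String × String)) (quotes : String)
    (q : Char) (s : List Char) (h : ∀ x ∈ s, ¬ x = q) :
    pvLoopA line block quotes s (some q) = s := by
  induction s with
  | nil => simp [pvLoopA]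
  | cons c t ih =>
    have hc : ¬ c = q := h c (by simp)
    rw [pvLoopA.eq_def]
    simp only [if_neg hc]
    exact congrArg (c :: ·) (ih fun x hx => h x (by simp [hx]))

theorem pvLoopA_take (line : Option String) (block : Option (String × String)) (quotes : String)
    (q : Char) : ∀ (k : Nat) (s : List Char), (∀ x ∈ s.take k, ¬ x = q) →
    pvLoopA line block quotes s (some q)
      = s.take k ++ pvLoopA line block quotes (s.drop k) (some q) := by
  intro k
  induction k with
  | zero => simp
  | succ k ih =>
    intro s h
    cases s with
    | nil => simp
    | cons c t =>
      have hc : ¬ c = q := h c (by simp)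
      rw [pvLoopA.eq_def]
      simp only [if_neg hc, List.take_succ_cons, List.drop_succ_cons, List.cons_append]
      exact congrArg (c :: ·) (ih t fun x hx => h x (by simp [hx]))

theorem pvLoopA_qq (line : Option String) (block : Option (String × String)) (quotes : String)
    (q : Char) (l2 : List Char) :
    pvLoopA line block quotes (q :: q :: l2) (some q)
      = q :: q :: pvLoopA line block quotes l2 (some q) := by
  rw [pvLoopA.eq_def]; simp

theorem pvLoopA_qclose (line : Option String) (block : Option (String × String)) (quotes : String)
    (q c2 : Char) (l2 : List Char) (hc : ¬ c2 = q) :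
    pvLoopA line block quotes (q :: c2 :: l2) (some q)
      = q :: pvLoopA line block quotes (c2 :: l2) none := by
  rw [pvLoopA.eq_def]; simp [hc]

theorem pvLoopA_qlast (line : Option String) (block : Option (String × String)) (quotes : String)
    (q : Char) :
    pvLoopA line block quotes [q] (some q) = [q] := by
  rw [pvLoopA.eq_def]; simp [pvLoopA_nil_none]

theorem pvQuoted_loopA (line : Option String) (block : Option (String × String)) (quotes : String)
    (q : Char) (s : List Char) :
    pvLoopA line block quotes s (some q)
      = (pvQuoted q s).1 ++ pvLoopA line block quotes (pvQuoted q s).2 none := by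
  fun_induction pvQuoted q s with
  | case1 s hf =>
    have hall : ∀ x ∈ s, ¬ x = q := by
      intro x hx
      have := List.findIdx?_eq_none_iff.mp hf x hx
      simpa using this
    simp [pvLoopA_no_quote line block quotes q s hall, pvLoopA_nil_none]
  | case2 s j hf l2 p h2 ih =>
    obtain ⟨hjlt, hpj, hprior⟩ := List.findIdx?_eq_some_iff_getElem.mp hf
    have hsq : s[j] = q := by simpa using hpj
    have htk : ∀ x ∈ s.take j, ¬ x = q := by
      intro x hx
      obtain ⟨i, him, hix⟩ := List.mem_take_iff_getElem.mp hx
      intro hxq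
      exact hprior i (by omega) (by simp [hix, hxq])
    have hdj : s.drop j = q :: q :: l2 := by
      rw [List.drop_eq_getElem_cons hjlt, hsq, h2]
    have hd2 : s.drop (j + 2) = l2 := by
      have : s.drop (j + 2) = (s.drop (j + 1)).drop 1 := by
        rw [List.drop_drop]
      rw [this, h2]; simp
    have htk2 : s.take (j + 2) = s.take j ++ [q, q] := by
      rw [show j + 2 = j + 2 from rfl, List.take_add, hdj]
      simp
    rw [pvLoopA_take line block quotes q j s htk, hdj, pvLoopA_qq]
    rw [hd2] at ih
    rw [ih]
    simp only [htk2]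
    rw [show p = pvQuoted q (List.drop (j + 2) s) from rfl, hd2]
    simp
  | case3 s j hf c2 l2 h2 hc =>
    obtain ⟨hjlt, hpj, hprior⟩ := List.findIdx?_eq_some_iff_getElem.mp hf
    have hsq : s[j] = q := by simpa using hpj
    have htk : ∀ x ∈ s.take j, ¬ x = q := by
      intro x hx
      obtain ⟨i, him, hix⟩ := List.mem_take_iff_getElem.mp hx
      intro hxq
      exact hprior i (by omega) (by simp [hix, hxq])
    have hdj : s.drop j = q :: s.drop (j + 1) := by
      rw [List.drop_eq_getElem_cons hjlt, hsq]
    have htk1 : s.take (j + 1) = s.take j ++ [q] := by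
      rw [List.take_add, hdj]; simp
    rw [pvLoopA_take line block quotes q j s htk, hdj, h2,
        pvLoopA_qclose line block quotes q c2 l2 hc]
    simp [htk1, h2]
  | case4 s j hf h2 =>
    obtain ⟨hjlt, hpj, hprior⟩ := List.findIdx?_eq_some_iff_getElem.mp hf
    have hsq : s[j] = q := by simpa using hpj
    have htk : ∀ x ∈ s.take j, ¬ x = q := by
      intro x hx
      obtain ⟨i, him, hix⟩ := List.mem_take_iff_getElem.mp hx
      intro hxq
      exact hprior i (by omega) (by simp [hix, hxq])
    have hdj : s.drop j = q :: s.drop (j + 1) := by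
      rw [List.drop_eq_getElem_cons hjlt, hsq]
    have htk1 : s.take (j + 1) = s.take j ++ [q] := by
      rw [List.take_add, hdj]; simp
    rw [pvLoopA_take line block quotes q j s htk, hdj, h2, pvLoopA_qlast]
    simp [htk1, h2, pvLoopA_nil_none]

theorem pvSkipLine_eq (l : List Char) :
    pvSkipLine l = (match l.findIdx? (· = '\n') with
                    | none => [] | some nl => l.drop nl) := by
  induction l with
  | nil => simp [pvSkipLine]
  | cons c t ih =>
    rw [pvSkipLine]
    by_cases hc : c = '\n'
    · simp [hc, List.findIdx?_cons]
    · simp only [List.findIdx?_cons, decide_eq_true_eq, hc, if_false, ih]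
      cases hf : t.findIdx? (· = '\n') with
      | none => simp
      | some j => simp [List.drop_succ_cons]

theorem pvSkipBlock_eq (cl : List Char) (l : List Char) :
    (pvSkipBlock cl l).drop cl.length
      = (match pvFindSub cl l with
         | none => [] | some e => l.drop (e + cl.length)) := by
  induction l with
  | nil =>
    rw [pvSkipBlock, pvFindSub]
    split <;> simp
  | cons c t ih =>
    rw [pvSkipBlock, pvFindSub]
    by_cases hp : cl.isPrefixOf (c :: t)
    · simp [hp]
    · simp only [if_neg hp, ih]
      cases hf : pvFindSub cl t with
      | none => simp
      | some e =>
        simp only [Option.map_some]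
        have : e + 1 + cl.length = (e + cl.length) + 1 := by omega
        simp [this, List.drop_succ_cons]

theorem pvLoopA_run (line : Option String) (block : Option (String × String)) (quotes : String)
    (trig : List Char)
    (Hq : ∀ x, x ∈ quotes.toList → x ∈ trig)
    (Hl : ∀ lm, line = some lm → lm = "" ∨ ∃ h tl, lm.toList = h :: tl ∧ h ∈ trig)
    (Hb : ∀ o cl, block = some (o, cl) → ∃ h tl, o.toList = h :: tl ∧ h ∈ trig) :
    ∀ t : List Char,
      pvLoopA line block quotes t none
        = (pvRun trig t).1 ++ pvLoopA line block quotes (pvRun trig t).2 none := by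
  intro t
  induction t with
  | nil => simp [pvRun]
  | cons x t ih =>
    rw [pvRun]
    by_cases hx : x ∈ trig
    · have hxc : trig.contains x = true := by simpa using hx
      simp [hx, hxc]
    · have hxm : x ∉ trig := hx
      have hq : quotes.toList.contains x = false := by
        simpa using fun hmem => hxm (Hq x hmem)
      have hlh : pvLineHit line (x :: t) = false := by
        unfold pvLineHit
        cases line with
        | none => rfl
        | some lm =>
          rcases Hl lm rfl with h0 | ⟨h, tl, hlm, hmem⟩
          · simp [h0]
          · have hne : (h == x) = false := by
              simp only [beq_eq_false_iff_ne, ne_eq]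
              intro he; exact hxm (he ▸ hmem)
            simp [hlm, List.isPrefixOf, hne]
      rw [pvLoopA.eq_def]
      simp only [hq, Bool.false_eq_true, if_false, hlh, if_false]
      cases block with
      | none =>
        simp [hxm, ih]
      | some oc =>
        obtain ⟨o, cl⟩ := oc
        obtain ⟨h, tl, ho, hmem⟩ := Hb o cl rfl
        have hne : (h == x) = false := by
          simp only [beq_eq_false_iff_ne, ne_eq]
          intro he; exact hxm (he ▸ hmem)
        have hpf : o.toList.isPrefixOf (x :: t) = false := by
          simp [ho, List.isPrefixOf, hne]
        simp [hpf, hxm, ih]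

theorem pvLineHitB_eq (line : Option String) (l : List Char) :
    pvLineHitB line l = pvLineHit line l := by
  cases line <;> rfl

theorem pvLoopB_nil (line : Option String) (block : Option (String × String)) (quotes : String)
    (trig : List Char) : pvLoopB line block quotes trig [] = [] := by
  rw [pvLoopB.eq_def]

theorem pvTrig_mem_q (line : Option String) (block : Option (String × String)) (quotes : String)
    (x : Char) (h : x ∈ quotes.toList) : x ∈ pvTrig line block quotes := by
  simp [pvTrig, h]

theorem pvTrig_mem_line (line : Option String) (block : Option (String × String)) (quotes : String)
    (lm : String) (h : Char) (tl : List Char) (hlm : line = some lm) (hl : lm.toList = h :: tl) :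
    h ∈ pvTrig line block quotes := by
  subst hlm; simp [pvTrig, hl]

theorem pvTrig_mem_block (line : Option String) (block : Option (String × String)) (quotes : String)
    (o cl : String) (h : Char) (tl : List Char) (hb : block = some (o, cl)) (ho : o.toList = h :: tl) :
    h ∈ pvTrig line block quotes := by
  subst hb; simp [pvTrig, ho]

theorem loopA_loopB (line : Option String) (block : Option (String × String)) (quotes : String) :
    ∀ (s : List Char),
      pvLoopA line block quotes s none = pvLoopB line block quotes (pvTrig line block quotes) s := by
  have Hq : ∀ x, x ∈ quotes.toList → x ∈ pvTrig line block quotes :=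
    fun x h => pvTrig_mem_q line block quotes x h
  have Hl : ∀ lm, line = some lm →
      lm = "" ∨ ∃ h tl, lm.toList = h :: tl ∧ h ∈ pvTrig line block quotes := by
    intro lm hlm
    cases hl : lm.toList with
    | nil => exact Or.inl (String.toList_eq_nil_iff.mp hl)
    | cons h tl => exact Or.inr ⟨h, tl, rfl, pvTrig_mem_line line block quotes lm h tl hlm hl⟩
  suffices hmain : ∀ (n : Nat) (s : List Char), s.length ≤ n →
      pvLoopA line block quotes s none = pvLoopB line block quotes (pvTrig line block quotes) s by
    intro s; exact hmain s.length s le_rfl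
  intro n
  induction n with
  | zero =>
    intro s hs
    have : s = [] := List.length_eq_zero_iff.mp (Nat.le_zero.mp hs)
    subst this
    rw [pvLoopA_nil_none, pvLoopB_nil]
  | succ n ih =>
    intro s hs
    cases s with
    | nil => rw [pvLoopA_nil_none, pvLoopB_nil]
    | cons c rest =>
      have hrest : rest.length ≤ n := by
        simpa using Nat.lt_succ_iff.mp (by simpa using hs)
      rw [pvLoopA.eq_def, pvLoopB.eq_def]
      simp only [pvLineHitB_eq]
      by_cases hq : quotes.toList.contains c
      · simp only [hq, if_true, if_pos]
        rw [pvQuoted_loopA line block quotes c rest]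
        have h2 := ih (pvQuoted c rest).2 (le_trans (pvQuoted_snd_le c rest) hrest)
        rw [h2]
      · by_cases hl : pvLineHit line (c :: rest)
        · simp only [hq, Bool.false_eq_true, if_false, hl, if_true]
          rw [pvSkipLine_eq]
          by_cases hlt : (match (c :: rest).findIdx? (· = '\n') with
                          | none => ([] : List Char) | some nl => (c :: rest).drop nl).length
                            < (c :: rest).length
          · rw [dif_pos hlt, dif_pos hlt]
            exact ih _ (by simp at hlt ⊢; omega)
          · rw [dif_neg hlt, dif_neg hlt]
        · cases block with
          | none =>
            simp only [hq, Bool.false_eq_true, if_false, hl]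
            have Hb : ∀ o cl, (none : Option (String × String)) = some (o, cl) →
                ∃ h tl, o.toList = h :: tl ∧ h ∈ pvTrig line none quotes := by
              intro o cl h; cases h
            rw [pvLoopA_run line none quotes (pvTrig line none quotes) Hq Hl Hb rest]
            have h2 := ih (pvRun (pvTrig line none quotes) rest).2
              (le_trans (pvRun_snd_le _ rest) hrest)
            rw [h2]
            simp
          | some oc =>
            obtain ⟨o, cl⟩ := oc
            simp only [hq, Bool.false_eq_true, if_false, hl]
            by_cases hp : o.toList.isPrefixOf (c :: rest)
            · simp only [hp, if_true, if_pos]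
              rw [pvSkipBlock_eq]
              by_cases hlt : (match pvFindSub cl.toList ((c :: rest).drop o.toList.length) with
                              | none => ([] : List Char)
                              | some e => ((c :: rest).drop o.toList.length).drop (e + cl.toList.length)).length
                                < (c :: rest).length
              · rw [dif_pos hlt, dif_pos hlt]
                exact ih _ (by simp at hlt ⊢; omega)
              · rw [dif_neg hlt, dif_neg hlt]
            · simp only [hp, Bool.false_eq_true, if_false]
              have Hb : ∀ o' cl', (some (o, cl) : Option (String × String)) = some (o', cl') →
                  ∃ h tl, o'.toList = h :: tl ∧ h ∈ pvTrig line (some (o, cl)) quotes := by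
                intro o' cl' he
                cases he
                cases ho : o.toList with
                | nil => exact absurd (by simp [ho, List.isPrefixOf]) hp
                | cons h tl =>
                  exact ⟨h, tl, rfl, pvTrig_mem_block line (some (o, cl)) quotes o cl h tl rfl ho⟩
              rw [pvLoopA_run line (some (o, cl)) quotes (pvTrig line (some (o, cl)) quotes) Hq Hl Hb rest]
              have h2 := ih (pvRun (pvTrig line (some (o, cl)) quotes) rest).2
                (le_trans (pvRun_snd_le _ rest) hrest)
              rw [h2]
              simp

-- ===== VERDICT (by name: the statement is the Claim_ definition above) =====
theorem strip_comments_spec : Claim_equal_strip_comments := by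
  intro string line block quotes _
  unfold Spec_strip_comments strip_comments strip_comments_alt
  rw [loopA_loopB]
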